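-- pv_equiv track=rewrite | github.com/Carl-Saikhanbileg/tensor-compression | sketch.py | immediate_parent_subset
-- ===== SOURCE A (Python) =====
-- from typing import Iterable, Iterator, List, Sequence, Tuple
--
-- def normalize_subset(subset: Iterable[int]) -> Tuple[int, ...]:
--     return tuple(sorted(subset))
--
-- def immediate_parent_subset(
--     subset: Sequence[int],
--     family: Sequence[Sequence[int]],
-- ) -> Tuple[int, ...] | None:
--     """
--     Return the smallest strict superset of `subset` inside the family.
--     """
--     subset = normalize_subset(subset)
--     supersets = [
--         normalize_subset(t)
--         for t in family
--         if subset != normalize_subset(t) and set(subset) < set(t)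
--     ]
--     if not supersets:
--         return None
--     return min(supersets, key=lambda t: len(t))
-- ===== SOURCE B (Python) =====
-- def immediate_parent_subset(subset, family):
--     sset = set(subset)
--     for t in sorted(family, key=len):
--         if sset < set(t):
--             return tuple(sorted(t))
--     return None
-- ===== Notes on version B (the rewrite author's own statement) =====
-- stated objective: faster
-- what changed: Replaced build-all-normalized-supersets-then-min(key=len) by a stable length-sort of the family followed by an early-exit scan that returns the first strict superset; stability makes the first hit exactly min's first-minimum, and only that one member is ever element-sorted.
import Mathlib
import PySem

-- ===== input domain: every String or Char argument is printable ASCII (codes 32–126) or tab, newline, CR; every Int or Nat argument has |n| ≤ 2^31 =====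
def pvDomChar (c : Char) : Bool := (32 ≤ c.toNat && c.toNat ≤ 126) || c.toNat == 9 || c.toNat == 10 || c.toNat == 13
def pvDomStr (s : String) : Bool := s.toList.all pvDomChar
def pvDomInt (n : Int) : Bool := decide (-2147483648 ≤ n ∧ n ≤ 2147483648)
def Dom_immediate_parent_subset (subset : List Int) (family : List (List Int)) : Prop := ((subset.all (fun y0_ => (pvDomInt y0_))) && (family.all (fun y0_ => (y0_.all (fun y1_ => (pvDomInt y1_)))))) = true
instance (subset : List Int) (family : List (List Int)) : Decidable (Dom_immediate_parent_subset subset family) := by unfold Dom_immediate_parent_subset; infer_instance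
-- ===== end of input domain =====

-- B sorts the family stably by length and returns the first strict superset (early exit) instead of
-- collecting all normalized supersets and taking min(key=len); an alternative decomposition, same value.

-- ===== PORT A =====
-- set(s) < set(t) — Python's strict-subset test; membership-based, exact for sets built from these lists
def pySetLt (s t : List Int) : Bool :=
  s.all (fun x => t.contains x) && !(t.all (fun x => s.contains x))

def immediate_parent_subset (subset : List Int) (family : List (List Int)) : Option (List Int) :=
  let subset' := PySem.List.sorted subset (fun x => x) false
  let supersets :=
    (family.filter (fun t =>
      decide (subset' ≠ PySem.List.sorted t (fun x => x) false) && pySetLt subset' t)).map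
      (fun t => PySem.List.sorted t (fun x => x) false)
  if supersets = [] then none
  else PySem.List.min? supersets (fun t => t.length)

-- ===== PORT B =====
def immediate_parent_subset_alt (subset : List Int) (family : List (List Int)) : Option (List Int) :=
  match (PySem.List.sorted family (fun t => t.length) false).find? (fun t => pySetLt subset t) with
  | some t => some (PySem.List.sorted t (fun x => x) false)
  | none => none

-- ===== PRECONDITION & SPEC =====
def Spec_immediate_parent_subset (subset : List Int) (family : List (List Int)) (out : Option (List Int)) : Prop := out = immediate_parent_subset_alt subset family
instance (subset : List Int) (family : List (List Int)) (out : Option (List Int)) : Decidable (Spec_immediate_parent_subset subset family out) := by unfold Spec_immediate_parent_subset; infer_instance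

-- ===== CLAIM (what is proved, stated in full; the proofs are below) =====
def Claim_equal_immediate_parent_subset : Prop := ∀ (subset : List Int) (family : List (List Int)), Dom_immediate_parent_subset subset family → Spec_immediate_parent_subset subset family (immediate_parent_subset subset family)

-- ===== LEMMAS AND PROOFS =====

-- A's redundant inequality guard: strict set-inclusion already forces the sorted copies to differ.
theorem pySetLt_sorted (s t : List Int) :
    pySetLt (PySem.List.sorted s (fun x => x) false) t = pySetLt s t := by
  rw [Bool.eq_iff_iff]
  simp [pySetLt, List.all_eq_true, List.contains_eq_mem, PySem.List.mem_sorted]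

theorem sorted_ne_of_pySetLt {s t : List Int}
    (h : pySetLt (PySem.List.sorted s (fun x => x) false) t = true) :
    PySem.List.sorted s (fun x => x) false ≠ PySem.List.sorted t (fun x => x) false := by
  intro he
  simp only [pySetLt, Bool.and_eq_true, Bool.not_eq_true', List.all_eq_false] at h
  obtain ⟨-, y, hyt, hy⟩ := h
  apply hy
  rw [he]
  simpa [List.contains_eq_mem] using (PySem.List.mem_sorted t (fun x => x) false y).mpr hyt

theorem cond_eq (subset : List Int) :
    (fun t => decide (PySem.List.sorted subset (fun x => x) false ≠ PySem.List.sorted t (fun x => x) false)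
        && pySetLt (PySem.List.sorted subset (fun x => x) false) t)
      = (fun t => pySetLt subset t) := by
  funext t
  rw [pySetLt_sorted]
  by_cases h : pySetLt subset t = true
  · have h' : pySetLt (PySem.List.sorted subset (fun x => x) false) t = true :=
      (pySetLt_sorted subset t).trans h
    simp [h, sorted_ne_of_pySetLt h']
  · simp [Bool.eq_false_iff.mpr h]

-- min? over a mapped list is the mapped min? with the composed key
theorem min?_foldl_map {α β κ : Type} [LinearOrder κ] (f : α → β) (key : β → κ)
    (xs : List α) (a : Option α) :
    List.foldl (fun acc x =>
        match acc with
        | none => some x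
        | some m => if key x < key m then some x else some m) (a.map f) (xs.map f)
      = (List.foldl (fun acc x =>
          match acc with
          | none => some x
          | some m => if key (f x) < key (f m) then some x else some m) a xs).map f := by
  induction xs generalizing a with
  | nil => rfl
  | cons y ys ih =>
    cases a with
    | none => exact ih (some y)
    | some m =>
      simp only [List.map_cons, List.foldl_cons, Option.map_some]
      by_cases h : key (f y) < key (f m) <;> simp [h, ← ih]

theorem min?_map {α β κ : Type} [LinearOrder κ] (f : α → β) (key : β → κ) (xs : List α) :
    PySem.List.min? (xs.map f) key
      = (PySem.List.min? xs (fun x => key (f x))).map f := by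
  simpa [PySem.List.min?] using min?_foldl_map f key xs none

-- the key step of the equivalence: a filtered min? over the original order equals the first
-- match in the stable key-sorted list.
theorem find?_insertBy {α κ : Type} [LinearOrder κ] (key : α → κ) (p : α → Bool)
    (x : α) (ss : List α) (hs : ss.Pairwise (fun a b => key a ≤ key b)) :
    (PySem.List.insertBy (fun a b => decide (key a < key b)) x ss).find? p
      = match ss.find? p with
        | some r => if key r ≤ key x then some r else if p x then some x else some r
        | none => if p x then some x else none := by
  induction ss with
  | nil =>
    simp only [PySem.List.insertBy, List.find?]
    by_cases hx : p x <;> simp [hx]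
  | cons y ys ih =>
    rw [List.pairwise_cons] at hs
    obtain ⟨hy, hys⟩ := hs
    by_cases hlt : key x < key y
    · have hrw : PySem.List.insertBy (fun a b => decide (key a < key b)) x (y :: ys) = x :: y :: ys := by
        simp [PySem.List.insertBy, hlt]
      rw [hrw]
      cases hfy : (y :: ys).find? p with
      | none =>
        by_cases hx : p x <;> simp [hx, hfy]
      | some r =>
        have hr : r ∈ y :: ys := List.mem_of_find?_eq_some hfy
        have hyr : key y ≤ key r := by
          rcases List.mem_cons.mp hr with h | h
          · exact le_of_eq (congrArg key h.symm)
          · exact hy r h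
        have hnle : ¬ key r ≤ key x := not_le.mpr (lt_of_lt_of_le hlt hyr)
        by_cases hx : p x <;> simp [hx, hfy, hnle]
    · have hins : PySem.List.insertBy (fun a b => decide (key a < key b)) x (y :: ys)
          = y :: PySem.List.insertBy (fun a b => decide (key a < key b)) x ys := by
        simp [PySem.List.insertBy, hlt]
      rw [hins]
      by_cases hpy : p y
      · have hyx : key y ≤ key x := le_of_not_gt hlt
        simp [List.find?, hpy, hyx]
      · simp only [List.find?, Bool.of_not_eq_true hpy]
        exact ih hys

theorem find?_sorted_eq_min?_filter {α κ : Type} [LinearOrder κ] (key : α → κ) (p : α → Bool)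
    (xs : List α) :
    (PySem.List.sorted xs key false).find? p = PySem.List.min? (xs.filter p) key := by
  induction xs using List.reverseRecOn with
  | nil => rfl
  | append_singleton ys x ih =>
    have hsorted : PySem.List.sorted (ys ++ [x]) key false
        = PySem.List.insertBy (fun a b => decide (key a < key b)) x (PySem.List.sorted ys key false) := by
      rw [PySem.List.sorted_eq_foldl_insertBy, PySem.List.sorted_eq_foldl_insertBy, List.foldl_append]
      rfl
    rw [hsorted, find?_insertBy key p x _ (PySem.List.sorted_pairwise ys key), ih]
    rw [List.filter_append]
    by_cases hx : p x
    · simp only [hx, List.filter_cons, List.filter_nil]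
      simp only [PySem.List.min?, List.foldl_append]
      cases hm : PySem.List.min? (ys.filter p) key with
      | none => simp [PySem.List.min?] at hm; simp [hm]
      | some m =>
        have := hm
        simp only [PySem.List.min?] at this
        simp only [this]
        by_cases hlt : key x < key m
        · simp [not_le.mpr hlt, hlt]
        · simp [le_of_not_gt (fun h => hlt h), hlt]
    · simp only [List.filter_cons, hx, Bool.false_eq_true, if_false, List.filter_nil,
        List.append_nil]
      cases PySem.List.min? (List.filter p ys) key with
      | none => simp
      | some m => by_cases h : key m ≤ key x <;> simp [h]

theorem normalize_length (t : List Int) :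
    (PySem.List.sorted t (fun x => x) false).length = t.length :=
  PySem.List.length_sorted t (fun x => x) false

-- ===== VERDICT (by name: the statement is the Claim_ definition above) =====
theorem immediate_parent_subset_spec : Claim_equal_immediate_parent_subset := by
  intro subset family _
  unfold Spec_immediate_parent_subset immediate_parent_subset immediate_parent_subset_alt
  simp only [cond_eq]
  rw [find?_sorted_eq_min?_filter (fun t : List Int => t.length) (fun t => pySetLt subset t) family]
  rw [min?_map (fun t => PySem.List.sorted t (fun x => x) false) (fun t : List Int => t.length)]
  simp only [normalize_length]
  cases hm : PySem.List.min? (family.filter (fun t => pySetLt subset t)) (fun t => t.length) with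
  | none =>
    have : family.filter (fun t => pySetLt subset t) = [] :=
      (PySem.List.min?_eq_none_iff _ _).mp hm
    simp [this]
  | some m =>
    have hne : family.filter (fun t => pySetLt subset t) ≠ [] := by
      intro h; rw [h] at hm; simp [PySem.List.min?] at hm
    simp [hne]
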